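-- pv_equiv track=rewrite | github.com/aanasakhtar/CI_Project | evaluation/partition_utils.py | partition_to_node_memberships
-- ===== SOURCE A (Python) =====
-- def partition_to_node_memberships(partition: list[frozenset]) -> dict[int, list[int]]:
--     """
--     Convert list[frozenset] communities to node -> sorted community ids.
--
--     Example
--     -------
--     partition = [frozenset({1, 2, 3}), frozenset({3, 4})]
--     returns   = {1: [0], 2: [0], 3: [0, 1], 4: [1]}
--     """
--     node_to_communities: dict[int, list[int]] = {}
--
--     for cid, community in enumerate(partition):
--         for node in community:
--             node_to_communities.setdefault(node, []).append(cid)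
--
--     for node in node_to_communities:
--         node_to_communities[node].sort()
--
--     # Stable ordering makes diffs and debugging easier.
--     return dict(sorted(node_to_communities.items(), key=lambda item: item[0]))
-- ===== SOURCE B (Python) =====
-- def partition_to_node_memberships(partition):
--     # One flat sort of all (node, cid) pairs replaces per-node sorts and the
--     # final sorted(items); then a single grouping scan over the sorted pairs.
--     pairs = sorted((node, cid) for cid, community in enumerate(partition) for node in community)
--     result = {}
--     i, n = 0, len(pairs)
--     while i < n:
--         node = pairs[i][0]
--         j = i
--         while j < n and pairs[j][0] == node:
--             j += 1
--         result[node] = [cid for _, cid in pairs[i:j]]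
--         i = j
--     return result
-- ===== Notes on version B (the rewrite author's own statement) =====
-- stated objective: idiomatic
-- what changed: Replaces the dict-of-append-lists plus per-node sorts plus a final sorted(items) pass with one flat sort of all (node, cid) pairs followed by a single grouping scan, which yields both orderings at once.
import Mathlib
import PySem

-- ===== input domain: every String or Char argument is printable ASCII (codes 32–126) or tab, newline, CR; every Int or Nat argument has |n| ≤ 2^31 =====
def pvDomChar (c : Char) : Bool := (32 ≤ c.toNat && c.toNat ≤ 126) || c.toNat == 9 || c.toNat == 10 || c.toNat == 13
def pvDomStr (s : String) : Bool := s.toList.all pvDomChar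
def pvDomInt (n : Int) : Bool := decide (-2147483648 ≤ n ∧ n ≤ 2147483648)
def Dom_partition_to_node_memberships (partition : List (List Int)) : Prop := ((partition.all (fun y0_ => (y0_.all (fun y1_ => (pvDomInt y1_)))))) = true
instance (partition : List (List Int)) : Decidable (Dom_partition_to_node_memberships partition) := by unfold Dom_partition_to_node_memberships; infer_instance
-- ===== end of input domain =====

-- B replaces A's dict-of-appended-lists + per-node sorts + final sorted(items) by one
-- flat sort of all (node, cid) pairs and a single grouping scan (objective: idiomatic).

-- ===== PORT A =====
def partition_to_node_memberships (partition : List (List Int)) : List (Int × List Int) :=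
  let d := (PySem.List.enumerate partition 0).foldl
    (fun d p => p.2.foldl (fun d node => d.modify node [] (fun l => l ++ [p.1])) d)
    PySem.Dict.empty
  let d2 := d.keys.foldl
    (fun d' node => d'.insert node (PySem.List.sorted (d'.getD node []) (fun x => x))) d
  ((PySem.List.sorted d2.items (fun item => item.1)).foldl
    (fun acc item => acc.insert item.1 item.2) PySem.Dict.empty).items

-- ===== PORT B =====
-- the grouping scan over the sorted pair list (the two-pointer while loop of Source B)
def pvGroup (ps : List (Int × Int)) : List (Int × List Int) :=
  match ps with
  | [] => []
  | p :: rest =>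
    (p.1, p.2 :: (rest.takeWhile (fun q => q.1 == p.1)).map (fun q => q.2)) ::
      pvGroup (rest.dropWhile (fun q => q.1 == p.1))
termination_by ps.length
decreasing_by
  simp only [List.length_cons]
  exact Nat.lt_succ_of_le (List.length_dropWhile_le _ _)

def partition_to_node_memberships_alt (partition : List (List Int)) : List (Int × List Int) :=
  pvGroup (PySem.List.sorted2
    ((PySem.List.enumerate partition 0).flatMap (fun p => p.2.map (fun node => (node, p.1))))
    (fun q => q.1) (fun q => q.2))

-- ===== PRECONDITION & SPEC =====
def Spec_partition_to_node_memberships (partition : List (List Int)) (out : List (Int × List Int)) : Prop := out = partition_to_node_memberships_alt partition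
instance (partition : List (List Int)) (out : List (Int × List Int)) : Decidable (Spec_partition_to_node_memberships partition out) := by unfold Spec_partition_to_node_memberships; infer_instance

-- ===== CLAIM (what is proved, stated in full; the proofs are below) =====
def Claim_equal_partition_to_node_memberships : Prop := ∀ (partition : List (List Int)), Dom_partition_to_node_memberships partition → Spec_partition_to_node_memberships partition (partition_to_node_memberships partition)

-- ===== LEMMAS AND PROOFS =====

-- All (node, cid) pairs of the partition, in enumeration order.
def pvPairs (partition : List (List Int)) : List (Int × Int) :=
  (PySem.List.enumerate partition 0).flatMap (fun p => p.2.map (fun node => (node, p.1)))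

-- The sorted community-id list of node k.
def pvCS (ps : List (Int × Int)) (k : Int) : List Int :=
  PySem.List.sorted ((ps.filter (fun q => q.1 == k)).map (fun q => q.2)) (fun x => x)

-- The distinct nodes, sorted.
def pvKeys (ps : List (Int × Int)) : List Int :=
  PySem.List.sorted (PySem.Set.ofList (ps.map (fun q => q.1))) (fun x => x)

-- Python's lexicographic ≤ on int pairs.
def pvLexLe (a b : Int × Int) : Prop := a.1 < b.1 ∨ (a.1 = b.1 ∧ a.2 ≤ b.2)

lemma pvLexLe_antisymm (a b : Int × Int) (h1 : pvLexLe a b) (h2 : pvLexLe b a) : a = b := by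
  unfold pvLexLe at h1 h2
  have : a.1 = b.1 ∧ a.2 = b.2 := by omega
  exact Prod.ext this.1 this.2

-- ===== A-side: the nested setdefault/append loop is the pair-list loop =====

lemma pvFoldNest (L : List (Int × List Int)) (d0 : PySem.Dict Int (List Int)) :
    L.foldl (fun d p => p.2.foldl (fun d node => d.modify node [] (fun l => l ++ [p.1])) d) d0
      = (L.flatMap (fun p => p.2.map (fun node => (node, p.1)))).foldl
          (fun d q => d.modify q.1 [] (fun l => l ++ [q.2])) d0 := by
  induction L generalizing d0 with
  | nil => rfl
  | cons p L ih => simp [List.flatMap_cons, List.foldl_append, List.foldl_map, ih]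

lemma pvSortLoop (ks : List Int) (d : PySem.Dict Int (List Int)) (hnd : ks.Nodup) (k : Int) :
    (ks.foldl (fun d' n => d'.insert n (PySem.List.sorted (d'.getD n []) (fun x => x))) d).getD k []
      = if k ∈ ks then PySem.List.sorted (d.getD k []) (fun x => x) else d.getD k [] := by
  induction ks generalizing d with
  | nil => simp
  | cons a ks ih =>
    have htl := List.nodup_cons.mp hnd
    simp only [List.foldl_cons]
    rw [ih _ htl.2, PySem.Dict.getD_insert]
    by_cases hk : k ∈ ks
    · have hne : k ≠ a := fun h => htl.1 (h ▸ hk)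
      simp [hk, hne, List.mem_cons]
    · by_cases hka : k = a <;> simp [hk, hka, List.mem_cons]

lemma pvSetUpdateSelf (s : List Int) (l : List Int) (h : ∀ x ∈ l, x ∈ s) :
    PySem.Set.update s l = s := by
  induction l generalizing s with
  | nil => rfl
  | cons a l ih =>
    rw [PySem.Set.update_cons]
    rw [PySem.Set.add_of_mem (h a (by simp))]
    exact ih s (fun x hx => h x (by simp [hx]))

lemma pvA_eq (partition : List (List Int)) :
    partition_to_node_memberships partition
      = (pvKeys (pvPairs partition)).map (fun k => (k, pvCS (pvPairs partition) k)) := by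
  unfold partition_to_node_memberships
  simp only []
  rw [pvFoldNest]
  rw [show List.flatMap (fun (p : Int × List Int) => List.map (fun node => (node, p.1)) p.2)
        (PySem.List.enumerate partition) = pvPairs partition from rfl]
  set ps := pvPairs partition with hps
  set dA := ps.foldl (fun d q => d.modify q.1 [] (fun l => l ++ [q.2]))
    (PySem.Dict.empty : PySem.Dict Int (List Int)) with hdA
  have hgetD : ∀ k, dA.getD k [] = (ps.filter (fun q => q.1 == k)).map (fun q => q.2) := by
    intro k
    rw [hdA, PySem.Dict.getD_foldl_modify_append, PySem.Dict.getD_empty]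
    simp
  have hkeys : dA.keys = PySem.Set.ofList (ps.map (fun q => q.1)) := by
    rw [hdA, PySem.Dict.keys_foldl_modify_key ps (fun q => q.1) [] (fun _ q => fun l => l ++ [q.2]),
        PySem.Dict.keys_empty, PySem.Set.update_nil_left]
  have hknd : dA.keys.Nodup := by rw [hkeys]; exact PySem.Set.nodup_ofList _
  set d2 := dA.keys.foldl
    (fun d' node => d'.insert node (PySem.List.sorted (d'.getD node []) (fun x => x))) dA with hd2
  have hk2 : d2.keys = dA.keys := by
    rw [hd2, PySem.Dict.keys_foldl_insert]
    exact pvSetUpdateSelf _ _ (fun x hx => hx)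
  have hnd2 : d2.keys.Nodup := by rw [hk2]; exact hknd
  have hitems : d2.items = dA.keys.map (fun k => (k, pvCS ps k)) := by
    rw [PySem.Dict.items_eq_map_keys d2 hnd2 [], hk2]
    refine List.map_congr_left (fun k hk => ?_)
    rw [hd2, pvSortLoop _ _ hknd, if_pos hk, hgetD]
    rfl
  have hsorted : PySem.List.sorted d2.items (fun item => item.1)
      = (pvKeys ps).map (fun k => (k, pvCS ps k)) := by
    apply PySem.List.sorted_eq_of_perm_of_pairwise_lt
    · rw [hitems, hkeys]
      exact ((PySem.List.sorted_perm _ _ _).map _)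
    · have hpw := PySem.List.sorted_ofList_pairwise_lt (ps.map (fun q => q.1))
      exact List.Pairwise.map _ (fun a b h => h) hpw
  rw [hsorted]
  set L := (pvKeys ps).map (fun k => (k, pvCS ps k)) with hL
  have hfst : (L.map (fun item => item.1)).Nodup := by
    rw [hL, List.map_map]
    have : ((fun (item : Int × List Int) => item.1) ∘ fun k => (k, pvCS ps k)) = id := rfl
    rw [this, List.map_id]
    exact (PySem.List.sorted_perm _ _ _).nodup_iff.mpr (PySem.Set.nodup_ofList _)
  rw [PySem.Dict.items_foldl_insert_fresh L (fun item => item.1) (fun item => item.2)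
        PySem.Dict.empty (fun a _ => PySem.Dict.contains_empty _) hfst]
  simp
  rfl

-- ===== B-side: sorted2 of the pairs is the grouped flat list =====

-- the comparison sorted2 uses (key fst, then snd)
def pvBefore (a b : Int × Int) : Bool :=
  decide (a.1 < b.1) || (!decide (b.1 < a.1) && decide (a.2 < b.2))

lemma pvBefore_true {a b : Int × Int} (h : pvBefore a b = true) : pvLexLe a b := by
  unfold pvBefore at h; unfold pvLexLe
  simp at h; omega

lemma pvBefore_false {a b : Int × Int} (h : pvBefore a b = false) : pvLexLe b a := by
  unfold pvBefore at h; unfold pvLexLe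
  simp at h; omega

lemma pvInsertBy_pairwise (x : Int × Int) (ys : List (Int × Int)) (h : ys.Pairwise pvLexLe) :
    (PySem.List.insertBy pvBefore x ys).Pairwise pvLexLe := by
  induction ys with
  | nil => simp [PySem.List.insertBy]
  | cons y ys ih =>
    rw [PySem.List.insertBy]
    rcases List.pairwise_cons.mp h with ⟨hy, hys⟩
    by_cases hb : pvBefore x y = true
    · rw [if_pos hb]
      refine List.pairwise_cons.mpr ⟨?_, h⟩
      intro z hz
      rcases List.mem_cons.mp hz with rfl | hz
      · exact pvBefore_true hb
      · exact pvLexLe_antisymm x x (Or.inr ⟨rfl, le_refl _⟩) (Or.inr ⟨rfl, le_refl _⟩) ▸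
          (by
            rcases pvBefore_true hb with h1 | h1
            · rcases hy z hz with h2 | h2
              · exact Or.inl (lt_trans h1 h2)
              · exact Or.inl (h2.1 ▸ h1)
            · rcases hy z hz with h2 | h2
              · exact Or.inl (h1.1 ▸ h2)
              · exact Or.inr ⟨h1.1.trans h2.1, le_trans h1.2 h2.2⟩)
    · rw [if_neg hb]
      refine List.pairwise_cons.mpr ⟨?_, ih hys⟩
      intro z hz
      rcases (PySem.List.mem_insertBy pvBefore x z ys).mp hz with rfl | hz
      · exact pvBefore_false (Bool.eq_false_iff.mpr hb)
      · exact hy z hz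

lemma pvFold_pairwise (xs : List (Int × Int)) (acc : List (Int × Int))
    (h : acc.Pairwise pvLexLe) :
    (xs.foldl (fun acc x => PySem.List.insertBy pvBefore x acc) acc).Pairwise pvLexLe := by
  induction xs generalizing acc with
  | nil => exact h
  | cons x xs ih => exact ih _ (pvInsertBy_pairwise x acc h)

lemma pvSorted2_pairwise (xs : List (Int × Int)) :
    (PySem.List.sorted2 xs (fun q => q.1) (fun q => q.2)).Pairwise pvLexLe :=
  pvFold_pairwise xs [] List.Pairwise.nil

-- the grouped flat list
def pvS (ps : List (Int × Int)) : List (Int × Int) :=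
  (pvKeys ps).flatMap (fun k => (pvCS ps k).map (fun c => (k, c)))

lemma pvPartitionPerm (ks : List Int) (ps : List (Int × Int)) (hnd : ks.Nodup)
    (h : ∀ q ∈ ps, q.1 ∈ ks) :
    (ks.flatMap (fun k => ps.filter (fun q => q.1 == k))).Perm ps := by
  induction ks generalizing ps with
  | nil =>
    have : ps = [] := List.eq_nil_iff_forall_not_mem.mpr (fun q hq => by simpa using h q hq)
    simp [this]
  | cons a ks ih =>
    have htl := List.nodup_cons.mp hnd
    rw [List.flatMap_cons]
    have hcong : ks.flatMap (fun k => ps.filter (fun q => q.1 == k))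
        = ks.flatMap (fun k => (ps.filter (fun q => !(q.1 == a))).filter (fun q => q.1 == k)) := by
      apply List.flatMap_congr
      intro k hk
      rw [List.filter_filter]
      apply List.filter_congr
      intro q _
      by_cases hq : q.1 = k
      · have : k ≠ a := fun hka => htl.1 (hka ▸ hk)
        simp [hq, this]
      · simp [hq]
    rw [hcong]
    have hperm := ih (ps.filter (fun q => !(q.1 == a))) htl.2 (fun q hq => by
      rcases List.mem_filter.mp hq with ⟨hq1, hq2⟩
      rcases List.mem_cons.mp (h q hq1) with h1 | h1
      · simp [h1] at hq2
      · exact h1)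
    exact (hperm.append_left _).trans (List.filter_append_perm _ ps)

lemma pvS_perm (ps : List (Int × Int)) : (pvS ps).Perm ps := by
  unfold pvS
  have h1 : ∀ k ∈ pvKeys ps,
      ((pvCS ps k).map (fun c => (k, c))).Perm (ps.filter (fun q => q.1 == k)) := by
    intro k _
    have hp : (pvCS ps k).Perm ((ps.filter (fun q => q.1 == k)).map (fun q => q.2)) :=
      PySem.List.sorted_perm _ _ _
    have hm := hp.map (fun c => (k, c))
    rw [List.map_map] at hm
    have heq : (ps.filter (fun q => q.1 == k)).map ((fun c => (k, c)) ∘ (fun q => q.2))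
        = ps.filter (fun q => q.1 == k) := by
      have hid : ∀ q ∈ ps.filter (fun q => q.1 == k),
          ((fun c => (k, c)) ∘ (fun q => q.2)) q = id q := by
        intro q hq
        have h2 : q.1 = k := by simpa using (List.mem_filter.mp hq).2
        simp [Function.comp]
        exact Prod.ext h2.symm rfl
      rw [List.map_congr_left hid, List.map_id]
    exact heq ▸ hm
  have h2 := List.Perm.flatMap (List.Perm.refl (pvKeys ps)) h1
  have h3 : ((pvKeys ps).flatMap (fun k => ps.filter (fun q => q.1 == k))).Perm
      ((PySem.Set.ofList (ps.map (fun q => q.1))).flatMap (fun k => ps.filter (fun q => q.1 == k))) :=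
    List.Perm.flatMap (PySem.List.sorted_perm _ _ _) (fun _ _ => List.Perm.refl _)
  have h4 := pvPartitionPerm (PySem.Set.ofList (ps.map (fun q => q.1))) ps
    (PySem.Set.nodup_ofList _)
    (fun q hq => (PySem.Set.mem_ofList _ _).mpr (List.mem_map.mpr ⟨q, hq, rfl⟩))
  exact (h2.trans h3).trans h4

lemma pvS_pairwise (ps : List (Int × Int)) : (pvS ps).Pairwise pvLexLe := by
  unfold pvS
  rw [List.pairwise_flatMap]
  constructor
  · intro k _
    exact List.Pairwise.map _ (fun a b h => Or.inr ⟨rfl, h⟩) (PySem.List.sorted_pairwise _ _)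
  · refine List.Pairwise.imp ?_ (PySem.List.sorted_ofList_pairwise_lt (ps.map (fun q => q.1)))
    intro k1 k2 h x hx y hy
    rcases List.mem_map.mp hx with ⟨c, _, rfl⟩
    rcases List.mem_map.mp hy with ⟨c', _, rfl⟩
    exact Or.inl h

lemma pvSorted2_eq_S (ps : List (Int × Int)) :
    PySem.List.sorted2 ps (fun q => q.1) (fun q => q.2) = pvS ps := by
  refine List.Perm.eq_of_pairwise (fun a b _ _ h1 h2 => pvLexLe_antisymm a b h1 h2)
    (pvSorted2_pairwise ps) (pvS_pairwise ps)
    ((PySem.List.sorted2_perm ps _ _ _).trans (pvS_perm ps).symm)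

lemma pvGroup_append (k : Int) (cs : List Int) (rest : List (Int × Int)) (hcs : cs ≠ [])
    (hrest : ∀ q ∈ rest, q.1 ≠ k) :
    pvGroup (cs.map (fun c => (k, c)) ++ rest) = (k, cs) :: pvGroup rest := by
  cases cs with
  | nil => exact absurd rfl hcs
  | cons c cs' =>
    simp only [List.map_cons, List.cons_append]
    rw [pvGroup]
    have hall : ∀ q ∈ cs'.map (fun c => ((k : Int), c)), (fun (q : Int × Int) => q.1 == k) q = true := by
      intro q hq
      rcases List.mem_map.mp hq with ⟨c', _, rfl⟩
      simp
    have hrest' : ∀ q ∈ rest, (fun (q : Int × Int) => q.1 == k) q = false := by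
      intro q hq
      simpa using hrest q hq
    have htw1 : List.takeWhile (fun (q : Int × Int) => q.1 == k) (cs'.map (fun c => (k, c)))
        = cs'.map (fun c => (k, c)) := List.takeWhile_eq_self_iff.mpr hall
    have htw2 : List.takeWhile (fun (q : Int × Int) => q.1 == k) rest = [] := by
      cases rest with
      | nil => rfl
      | cons r rs => simp [hrest' r (by simp)]
    have hdw1 : List.dropWhile (fun (q : Int × Int) => q.1 == k) (cs'.map (fun c => (k, c)))
        = [] := List.dropWhile_eq_nil_iff.mpr hall
    have hdw2 : List.dropWhile (fun (q : Int × Int) => q.1 == k) rest = rest := by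
      cases rest with
      | nil => rfl
      | cons r rs => simp [hrest' r (by simp)]
    rw [List.takeWhile_append, htw1, List.dropWhile_append, hdw1, hdw2, htw2]
    simp [List.map_map]

lemma pvGroup_flat (ps : List (Int × Int)) (sk : List Int) (hpw : sk.Pairwise (· < ·))
    (hne : ∀ k ∈ sk, pvCS ps k ≠ []) :
    pvGroup (sk.flatMap (fun k => (pvCS ps k).map (fun c => (k, c))))
      = sk.map (fun k => (k, pvCS ps k)) := by
  induction sk with
  | nil => simp [pvGroup]
  | cons a sk ih =>
    have hpw' := List.pairwise_cons.mp hpw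
    rw [List.flatMap_cons]
    rw [pvGroup_append a _ _ (hne a (by simp)) ?_]
    · rw [ih hpw'.2 (fun k hk => hne k (List.mem_cons_of_mem _ hk)), List.map_cons]
    · intro q hq
      rcases List.mem_flatMap.mp hq with ⟨k, hk, hq2⟩
      rcases List.mem_map.mp hq2 with ⟨c, _, rfl⟩
      exact (ne_of_lt (hpw'.1 k hk)).symm

lemma pvB_eq (partition : List (List Int)) :
    partition_to_node_memberships_alt partition
      = (pvKeys (pvPairs partition)).map (fun k => (k, pvCS (pvPairs partition) k)) := by
  unfold partition_to_node_memberships_alt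
  rw [show ((PySem.List.enumerate partition 0).flatMap (fun p => p.2.map (fun node => (node, p.1))))
        = pvPairs partition from rfl]
  rw [pvSorted2_eq_S]
  unfold pvS
  apply pvGroup_flat
  · exact PySem.List.sorted_ofList_pairwise_lt _
  · intro k hk hcs
    have hmem : k ∈ (pvPairs partition).map (fun q => q.1) := by
      have h1 := (PySem.List.mem_sorted _ _ _ _).mp hk
      exact (PySem.Set.mem_ofList _ _).mp h1
    rcases List.mem_map.mp hmem with ⟨q, hq, rfl⟩
    unfold pvCS at hcs
    rw [PySem.List.sorted_eq_nil_iff, List.map_eq_nil_iff, List.filter_eq_nil_iff] at hcs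
    exact hcs q hq (by simp)

-- ===== VERDICT (by name: the statement is the Claim_ definition above) =====
theorem partition_to_node_memberships_spec : Claim_equal_partition_to_node_memberships := by
  intro partition _
  unfold Spec_partition_to_node_memberships
  rw [pvA_eq, pvB_eq]
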